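-- pv_equiv track=rewrite | github.com/pnytko/merger | merger.py | dictionary_analysis
-- ===== SOURCE A (Python) =====
-- def dictionary_analysis(input_dict):
--     corners_list = []
--     group_paths = []
--     for input_ele in input_dict:
--         if [input_ele[1]] not in corners_list:
--             corners_list.append([input_ele[1]])
--             group_paths.append([])
--     for i in range (len(corners_list)):
--         for input_ele in input_dict:
--             if corners_list[i][0] == input_ele[1]:
--                 group_paths[i].append(input_ele[0])
--
--     return group_paths
-- ===== SOURCE B (Python) =====
-- def dictionary_analysis(input_dict):
--     groups = {}
--     for ele in input_dict:
--         if ele[1] in groups: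
--             groups[ele[1]].append(ele[0])
--         else:
--             groups[ele[1]] = [ele[0]]
--     return list(groups.values())
-- ===== Notes on version B (the rewrite author's own statement) =====
-- stated objective: faster
-- what changed: Replaces the two-phase O(n^2) scheme (collect distinct keys, then rescan the whole input for each key) by a single pass that hashes key -> list in an insertion-ordered dict and returns its values.
import Mathlib
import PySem

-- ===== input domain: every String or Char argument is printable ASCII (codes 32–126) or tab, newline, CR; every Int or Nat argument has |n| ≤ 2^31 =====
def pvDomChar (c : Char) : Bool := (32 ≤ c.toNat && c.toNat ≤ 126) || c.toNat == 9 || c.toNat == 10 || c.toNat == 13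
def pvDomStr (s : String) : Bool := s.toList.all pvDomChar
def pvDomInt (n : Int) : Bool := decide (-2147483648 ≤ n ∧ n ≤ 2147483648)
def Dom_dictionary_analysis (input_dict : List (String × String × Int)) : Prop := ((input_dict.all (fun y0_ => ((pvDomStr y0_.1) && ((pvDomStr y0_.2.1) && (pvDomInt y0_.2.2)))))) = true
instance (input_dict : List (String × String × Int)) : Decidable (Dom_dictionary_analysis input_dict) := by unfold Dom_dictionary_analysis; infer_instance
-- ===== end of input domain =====

-- B replaces A's quadratic collect-keys-then-rescan-per-key scheme by one pass over
-- the input keeping an insertion-ordered map key -> list of firsts (faster).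

-- ===== PORT A =====
-- first loop: collect distinct [key] singletons in first-occurrence order
-- second (nested) loop: for each i, scan the whole input and append matching firsts;
-- each group_paths[i] is only touched at iteration i, so the double loop is a map of
-- the inner scan over corners_list (corners_list[i][0] is headI — always a singleton).
def dictionary_analysis (input_dict : List (String × String × Int)) : List (List String) :=
  let corners_list := input_dict.foldl
    (fun cs e => if [e.2.1] ∈ cs then cs else cs ++ [[e.2.1]]) ([] : List (List String))
  corners_list.map (fun c =>
    input_dict.foldl (fun acc e => if c.headI = e.2.1 then acc ++ [e.1] else acc) [])

-- ===== PORT B =====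
-- exact port of the Python-dict operations B uses ('k in groups' / append / new entry):
-- an insertion-ordered association list, appending v to the first entry with key k,
-- or adding (k, [v]) at the end if k is absent.
def pvAddTo (d : List (String × List String)) (k : String) (v : String) :
    List (String × List String) :=
  match d with
  | [] => [(k, [v])]
  | (k', vs) :: rest =>
      if k' = k then (k', vs ++ [v]) :: rest else (k', vs) :: pvAddTo rest k v

def dictionary_analysis_alt (input_dict : List (String × String × Int)) : List (List String) :=
  (input_dict.foldl (fun d e => pvAddTo d e.2.1 e.1) []).map Prod.snd

-- ===== PRECONDITION & SPEC =====
def Spec_dictionary_analysis (input_dict : List (String × String × Int)) (out : List (List String)) : Prop := out = dictionary_analysis_alt input_dict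
instance (input_dict : List (String × String × Int)) (out : List (List String)) : Decidable (Spec_dictionary_analysis input_dict out) := by unfold Spec_dictionary_analysis; infer_instance

-- ===== CLAIM (what is proved, stated in full; the proofs are below) =====
def Claim_equal_dictionary_analysis : Prop := ∀ (input_dict : List (String × String × Int)), Dom_dictionary_analysis input_dict → Spec_dictionary_analysis input_dict (dictionary_analysis input_dict)

-- ===== LEMMAS AND PROOFS =====

-- keys of the input in first-occurrence order
def pvKeys (p : List (String × String × Int)) : List String :=
  p.foldl (fun ks e => if e.2.1 ∈ ks then ks else ks ++ [e.2.1]) []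

-- all firsts of the input whose key is k, in input order
def pvC (p : List (String × String × Int)) (k : String) : List String :=
  p.foldl (fun acc e => if k = e.2.1 then acc ++ [e.1] else acc) []

theorem pvC_acc (p : List (String × String × Int)) (k : String) (a : List String) :
    p.foldl (fun acc e => if k = e.2.1 then acc ++ [e.1] else acc) a = a ++ pvC p k := by
  induction p generalizing a with
  | nil => simp [pvC]
  | cons e p ih =>
      simp only [pvC, List.foldl_cons]
      rw [ih, ih]
      split <;> simp

theorem pvC_append (p : List (String × String × Int)) (e : String × String × Int)
    (k : String) :
    pvC (p ++ [e]) k = pvC p k ++ (if k = e.2.1 then [e.1] else []) := by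
  simp only [pvC, List.foldl_append, List.foldl_cons, List.foldl_nil]
  split <;> simp

theorem pvC_nil_of_not_mem (p : List (String × String × Int)) (k : String)
    (h : k ∉ p.map (fun e => e.2.1)) : pvC p k = [] := by
  induction p with
  | nil => rfl
  | cons e p ih =>
      simp only [List.map_cons, List.mem_cons, not_or] at h
      simp only [pvC, List.foldl_cons]
      rw [if_neg h.1]
      exact ih h.2

theorem pvKeys_acc (p : List (String × String × Int)) (ks : List String) (x : String) :
    x ∈ p.foldl (fun ks e => if e.2.1 ∈ ks then ks else ks ++ [e.2.1]) ks ↔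
      x ∈ ks ∨ x ∈ p.map (fun e => e.2.1) := by
  induction p generalizing ks with
  | nil => simp
  | cons e p ih =>
      simp only [List.foldl_cons, List.map_cons, List.mem_cons]
      split <;> rename_i h
      · rw [ih]
        constructor
        · tauto
        · rintro (hh | hh | hh)
          exacts [Or.inl hh, Or.inl (hh ▸ h), Or.inr hh]
      · rw [ih]
        simp only [List.mem_append, List.mem_singleton]
        tauto

theorem mem_pvKeys (p : List (String × String × Int)) (x : String) :
    x ∈ pvKeys p ↔ x ∈ p.map (fun e => e.2.1) := by
  simpa using pvKeys_acc p [] x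

theorem pvKeys_nodup_acc (p : List (String × String × Int)) (ks : List String)
    (h : ks.Nodup) :
    (p.foldl (fun ks e => if e.2.1 ∈ ks then ks else ks ++ [e.2.1]) ks).Nodup := by
  induction p generalizing ks with
  | nil => exact h
  | cons e p ih =>
      simp only [List.foldl_cons]
      split <;> rename_i hm
      · exact ih _ h
      · refine ih _ ?_
        rw [List.nodup_append]
        exact ⟨h, List.nodup_singleton _, fun a ha b hb => by
          rw [List.mem_singleton] at hb
          exact fun he => hm ((he.trans hb) ▸ ha)⟩

theorem pvKeys_nodup (p : List (String × String × Int)) : (pvKeys p).Nodup :=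
  pvKeys_nodup_acc p [] List.nodup_nil

theorem pvKeys_append (p : List (String × String × Int)) (e : String × String × Int) :
    pvKeys (p ++ [e]) =
      if e.2.1 ∈ pvKeys p then pvKeys p else pvKeys p ++ [e.2.1] := by
  simp [pvKeys, List.foldl_append]

theorem pvAddTo_map (ks : List String) (g : String → List String) (k v : String)
    (h : ks.Nodup) :
    pvAddTo (ks.map (fun x => (x, g x))) k v =
      if k ∈ ks then ks.map (fun x => (x, if x = k then g x ++ [v] else g x))
      else ks.map (fun x => (x, g x)) ++ [(k, [v])] := by
  induction ks with
  | nil => simp [pvAddTo]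
  | cons a ks ih =>
      simp only [List.nodup_cons] at h
      simp only [List.map_cons, pvAddTo, List.mem_cons]
      by_cases hak : a = k
      · subst hak
        rw [if_pos rfl, if_pos (Or.inl rfl), if_pos rfl]
        congr 1
        exact (List.map_congr_left fun x hx => by
          rw [if_neg (by rintro rfl; exact h.1 hx)]).symm
      · rw [if_neg hak, ih h.2]
        by_cases hk : k ∈ ks
        · rw [if_pos hk, if_pos (Or.inr hk), if_neg hak]
        · rw [if_neg hk, if_neg (by tauto)]
          simp

theorem pvMain (p : List (String × String × Int)) :
    p.foldl (fun d e => pvAddTo d e.2.1 e.1) [] =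
      (pvKeys p).map (fun x => (x, pvC p x)) := by
  induction p using List.reverseRecOn with
  | nil => simp [pvKeys, pvC]
  | append_singleton p e ih =>
      rw [List.foldl_append, List.foldl_cons, List.foldl_nil, ih,
        pvAddTo_map _ _ _ _ (pvKeys_nodup p), pvKeys_append]
      by_cases hk : e.2.1 ∈ pvKeys p
      · rw [if_pos hk, if_pos hk]
        refine List.map_congr_left fun x _ => ?_
        rw [pvC_append]
        by_cases hx : x = e.2.1
        · subst hx; simp
        · simp [hx]
      · rw [if_neg hk, if_neg hk, List.map_append]
        congr 1
        · refine List.map_congr_left fun x hx => ?_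
          rw [pvC_append, if_neg (by rintro rfl; exact hk hx)]
          simp
        · simp only [List.map_cons, List.map_nil]
          rw [pvC_append, if_pos rfl,
            pvC_nil_of_not_mem _ _ (by rwa [← mem_pvKeys])]
          simp

theorem pvCorners (p : List (String × String × Int)) :
    p.foldl (fun cs e => if [e.2.1] ∈ cs then cs else cs ++ [[e.2.1]])
        ([] : List (List String)) = (pvKeys p).map (fun x => [x]) := by
  suffices h : ∀ ks : List String,
      p.foldl (fun cs e => if [e.2.1] ∈ cs then cs else cs ++ [[e.2.1]])
          (ks.map (fun x => [x])) =
        (p.foldl (fun ks e => if e.2.1 ∈ ks then ks else ks ++ [e.2.1]) ks).map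
          (fun x => [x]) by simpa [pvKeys] using h []
  induction p with
  | nil => intro ks; rfl
  | cons e p ih =>
      intro ks
      simp only [List.foldl_cons]
      have : ([e.2.1] ∈ ks.map (fun x => [x])) ↔ e.2.1 ∈ ks := by
        simp
      by_cases hm : e.2.1 ∈ ks
      · rw [if_pos (this.mpr hm), if_pos hm, ih]
      · rw [if_neg (fun hc => hm (this.mp hc)), if_neg hm]
        have he : List.map (fun x => [x]) ks ++ [[e.2.1]]
            = List.map (fun x => [x]) (ks ++ [e.2.1]) := by simp
        rw [he]
        exact ih _

-- ===== VERDICT (by name: the statement is the Claim_ definition above) =====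
theorem dictionary_analysis_spec : Claim_equal_dictionary_analysis := by
  intro l _
  show dictionary_analysis l = dictionary_analysis_alt l
  rw [dictionary_analysis, dictionary_analysis_alt, pvMain, pvCorners, List.map_map,
    List.map_map]
  exact List.map_congr_left fun x _ => by
    simp only [Function.comp]
    rw [List.headI]
    exact pvC_acc l x [] ▸ rfl
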